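-- pv_equiv track=rewrite | github.com/szczotlab/isoforms_project | cellbarcodes.py | hamming_sphere
-- ===== SOURCE A (Python) =====
-- from typing import Dict, Tuple, Iterator
--
-- def hamming_sphere(s: str, k: int) -> Iterator[str]:
--     """
--     Yield all strings t for which the hamming distance between s and t is exactly k,
--     assuming the alphabet is A, C, G, T.
--     """
--     assert k >= 0
--     if k == 0:
--         yield s
--         return
--     n = len(s)
--
--     # i is the first position that is varied
--     for i in range(n - k + 1):
--         prefix = s[:i]
--         c = s[i]
--         suffix = s[i + 1 :]
--         for ch in "ACGT":
--             if ch == c: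
--                 continue
--             for t in hamming_sphere(suffix, k - 1):
--                 y = prefix + ch + t
--                 assert len(y) == n
--                 yield y
-- ===== SOURCE B (Python) =====
-- def hamming_sphere(s: str, k: int):
--     """
--     Yield all strings t at Hamming distance exactly k from s (alphabet ACGT),
--     via an iterative right-to-left DP table instead of recursive suffix slicing.
--     dp[j] = all strings at distance exactly j from the current suffix, in the
--     same order as the recursive enumeration (first changed position varies first).
--     """
--     assert k >= 0
--     if k > len(s):      # more changes than positions: the sphere is empty
--         return
--     dp = [[""]] + [[] for _ in range(k)]
--     for c in reversed(s):
--         alt = [ch for ch in "ACGT" if ch != c]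
--         ndp = [[c + t for t in dp[0]]]
--         for prev, cur in zip(dp, dp[1:]):
--             ndp.append([ch + t for ch in alt for t in prev]
--                        + [c + t for t in cur])
--         dp = ndp
--     yield from dp[k]
-- ===== Notes on version B (the rewrite author's own statement) =====
-- stated objective: alternative
-- what changed: Replaced the recursion on suffixes with a first-varied-position loop and string slicing by an iterative right-to-left dynamic-programming pass that zips adjacent rows of a table dp[j] = strings at distance exactly j from the current suffix; trades laziness and memory (the whole table is materialized) for a loop-free, slice-free, recursion-free formulation. Pre_ excludes k<0, where A raises AssertionError.
import Mathlib
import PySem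

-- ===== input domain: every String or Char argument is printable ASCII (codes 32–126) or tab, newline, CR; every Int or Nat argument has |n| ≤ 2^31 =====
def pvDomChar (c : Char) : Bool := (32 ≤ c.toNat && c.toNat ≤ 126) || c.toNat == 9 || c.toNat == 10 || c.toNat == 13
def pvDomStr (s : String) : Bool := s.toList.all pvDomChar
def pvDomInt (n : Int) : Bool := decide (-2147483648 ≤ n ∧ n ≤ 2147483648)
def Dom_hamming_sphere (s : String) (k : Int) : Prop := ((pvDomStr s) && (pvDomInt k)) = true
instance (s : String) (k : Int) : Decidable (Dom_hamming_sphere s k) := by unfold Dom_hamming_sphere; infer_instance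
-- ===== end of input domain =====

-- B replaces A's recursion on the first varied position (with slicing) by an
-- iterative right-to-left DP table dp[j] = strings at distance exactly j from
-- the current suffix; same output, same order (objective: alternative).

-- ===== PORT A =====
-- A works on Python strings; the port works on List Char (the PySem.Chars view)
-- and wraps with String.mk at the end.  `range(n - k - 1 + 1)` for the Python
-- recursion level k+1 has max(0, n - k) elements, i.e. List.range (n + 1 - (k+1))
-- with truncating Nat subtraction, exactly Python's count.  The always-true
-- `assert len(y) == n` is an identity check on the yielded value and is dropped.
def hamA : Nat → List Char → List (List Char)
  | 0, s => [s]
  | (k+1), s =>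
    (List.range (s.length + 1 - (k+1))).flatMap (fun i =>
      let pref := s.take i
      let c := s.getD i ' '      -- s[i]: i < n inside the range, so getD is exact
      let suffix := s.drop (i+1)
      ((['A','C','G','T']).filter (fun ch => ch ≠ c)).flatMap (fun ch =>
        (hamA k suffix).map (fun t => pref ++ ch :: t)))

def hamming_sphere (s : String) (k : Int) : List String :=
  if k < 0 then []          -- `assert k >= 0` raises here: excluded by Pre_
  else (hamA k.toNat s.toList).map String.mk

-- ===== PORT B =====
-- one step of Source B's loop body: from dp over the suffix to dp over c :: suffix
-- (dp[0] → headD, zip(dp, dp[1:]) → dp.zip dp.tail)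
def hamBstep (c : Char) (dp : List (List (List Char))) : List (List (List Char)) :=
  let alt := (['A','C','G','T']).filter (fun ch => ch ≠ c)
  ((dp.headD []).map (fun t => c :: t)) ::
    (dp.zip dp.tail).map (fun pc =>
      (alt.flatMap (fun ch => pc.1.map (fun t => ch :: t)))
        ++ (pc.2.map (fun t => c :: t)))

def hamming_sphere_alt (s : String) (k : Int) : List String :=
  if k < 0 then []          -- `assert k >= 0` raises here: excluded by Pre_
  else if (s.toList.length : Int) < k then []   -- k > len(s): the sphere is empty
  else
    let kk := k.toNat
    let dp0 : List (List (List Char)) := [([] : List Char)] :: List.replicate kk []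
    let dp := s.toList.reverse.foldl (fun dp c => hamBstep c dp) dp0
    (dp.getD kk []).map String.mk

-- ===== PRECONDITION & SPEC =====
-- Pre_ excludes exactly k < 0, where A raises AssertionError.
def Pre_hamming_sphere (s : String) (k : Int) : Prop := 0 ≤ k
instance (s : String) (k : Int) : Decidable (Pre_hamming_sphere s k) := by unfold Pre_hamming_sphere; infer_instance
def pvWitness_hamming_sphere : String × Int := ("ACG", 1)

def Spec_hamming_sphere (s : String) (k : Int) (out : List String) : Prop := out = hamming_sphere_alt s k
instance (s : String) (k : Int) (out : List String) : Decidable (Spec_hamming_sphere s k out) := by unfold Spec_hamming_sphere; infer_instance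

-- ===== CLAIM (what is proved, stated in full; the proofs are below) =====
def Claim_equal_hamming_sphere : Prop := ∀ (s : String) (k : Int), Dom_hamming_sphere s k → Pre_hamming_sphere s k → Spec_hamming_sphere s k (hamming_sphere s k)

-- ===== LEMMAS AND PROOFS =====

-- A on a nonempty string: vary position 0 (first block), or keep it (the rest)
lemma hamA_cons (k : Nat) (c : Char) (rest : List Char) :
    hamA (k+1) (c :: rest) =
      ((['A','C','G','T']).filter (fun ch => ch ≠ c)).flatMap
          (fun ch => (hamA k rest).map (fun t => ch :: t))
        ++ (hamA (k+1) rest).map (fun t => c :: t) := by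
  by_cases hk : rest.length + 1 ≤ k
  · obtain ⟨k', rfl⟩ : ∃ k', k = k' + 1 := ⟨k - 1, by omega⟩
    have h0 : rest.length - k' = 0 := by omega
    have h2 : rest.length + 1 - (k'+1) = 0 := by omega
    have h3 : rest.length + 1 - (k'+1+1) = 0 := by omega
    simp [hamA, h0, h2, h3]
  · have h1 : (c :: rest).length + 1 - (k+1) = (rest.length - k) + 1 := by simp; omega
    have h2 : rest.length + 1 - (k+1) = rest.length - k := by omega
    conv_lhs => rw [hamA]
    conv_rhs => rw [hamA]
    rw [h1, h2, List.range_succ_eq_map, List.flatMap_cons, List.flatMap_map, List.map_flatMap]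
    congr 1
    refine congrFun (congrArg List.flatMap (funext fun i => ?_)) _
    simp [List.map_flatMap, List.map_map, Function.comp_def]

-- zipping a mapped range' with its tail pairs consecutive values
lemma zip_tail_map {a : Type} (f : Nat → a) : ∀ (n s : Nat),
    ((List.range' s (n+1)).map f).zip (((List.range' s (n+1)).map f).tail) =
      (List.range' s n).map (fun j => (f j, f (j+1))) := by
  intro n
  induction n with
  | zero => intro s; simp [List.range'_succ]
  | succ n ih =>
    intro s
    have ih' := ih (s+1)
    simp only [List.range'_succ, List.map_cons, List.tail_cons] at ih'
    simp only [List.range'_succ, List.map_cons, List.tail_cons, List.zip_cons_cons, ih']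

lemma zip_tail_map_range {a : Type} (f : Nat → a) (n : Nat) :
    ((List.range (n+1)).map f).zip (((List.range (n+1)).map f).tail) =
      (List.range n).map (fun j => (f j, f (j+1))) := by
  rw [List.range_eq_range', List.range_eq_range', zip_tail_map]

lemma getD_map_range' {α : Type} (n j : Nat) (f : Nat → α) (d : α) (h : j < n) :
    ((List.range n).map f).getD j d = f j := by
  simp [List.getD, h]

-- the DP invariant: after folding a suffix, dp[j] = hamA j suffix for all j ≤ kk
lemma dp_inv (kk : Nat) (l : List Char) :
    l.foldr (fun c dp => hamBstep c dp) ([([] : List Char)] :: List.replicate kk []) =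
      (List.range (kk+1)).map (fun j => hamA j l) := by
  induction l with
  | nil =>
    rw [List.foldr_nil, List.range_succ_eq_map, List.map_cons, List.map_map]
    simp [hamA, Function.comp_def]
  | cons c l ih =>
    rw [List.foldr_cons, ih]
    simp only [hamBstep]
    rw [zip_tail_map_range, List.map_map]
    conv_rhs => rw [List.range_succ_eq_map, List.map_cons, List.map_map]
    rw [List.cons.injEq]
    constructor
    · rw [List.range_succ_eq_map, List.map_cons, List.headD_cons]
      simp [hamA]
    · refine congrFun (congrArg List.map (funext fun j => ?_)) _
      simp only [Function.comp_def]
      rw [hamA_cons]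

-- ===== VERDICT (by name: the statement is the Claim_ definition above) =====
theorem hamming_sphere_spec : Claim_equal_hamming_sphere := by
  intro s k _ hk
  unfold Pre_hamming_sphere at hk
  unfold Spec_hamming_sphere hamming_sphere hamming_sphere_alt
  rw [if_neg (by omega), if_neg (by omega)]
  by_cases hbig : (s.toList.length : Int) < k
  · rw [if_pos hbig]
    obtain ⟨k', hk'⟩ : ∃ k', k.toNat = k' + 1 := ⟨k.toNat - 1, by omega⟩
    rw [hk']
    have hsl : s.length = s.toList.length := by simp
    have h0 : s.length + 1 - (k' + 1) = 0 := by omega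
    simp [hamA, h0]
  · rw [if_neg hbig]
    simp only [List.foldl_reverse, dp_inv, getD_map_range' _ _ _ _ (Nat.lt_succ_self _)]
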